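-- pv_equiv track=rewrite | github.com/rwnobrega/komm | komm/_source_coding.py | _parse_prefix_free
-- ===== SOURCE A (Python) =====
-- def _parse_prefix_free(input_sequence, dictionary):
--     output_sequence = []
--     i = 0
--     while i < len(input_sequence):
--         j = 1
--         while i + j <= len(input_sequence):
--             try:
--                 key = tuple(input_sequence[i : i + j])
--                 output_sequence.extend(dictionary[key])
--                 break
--             except KeyError:
--                 j += 1
--         i += j
--     return output_sequence
-- ===== SOURCE B (Python) =====
-- def _parse_prefix_free(input_sequence, dictionary):
--     # One pass: grow a buffer symbol by symbol; emit on the shortest codeword hit,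
--     # stop early when the buffer is no longer a prefix of any codeword.
--     prefixes = {key[:t] for key in dictionary for t in range(1, len(key))}
--     output_sequence = []
--     buf = ()
--     for sym in input_sequence:
--         buf = buf + (sym,)
--         if buf in dictionary:
--             output_sequence.extend(dictionary[buf])
--             buf = ()
--         elif buf not in prefixes:
--             break
--     return output_sequence
-- ===== Notes on version B (the rewrite author's own statement) =====
-- stated objective: faster
-- what changed: Replaces A's per-position nested search (re-slice input[i:i+j] for every growing j) by a single incremental pass that extends a buffer one symbol at a time, emitting on the shortest codeword hit and stopping early via a precomputed set of proper codeword prefixes.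
import Mathlib
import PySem

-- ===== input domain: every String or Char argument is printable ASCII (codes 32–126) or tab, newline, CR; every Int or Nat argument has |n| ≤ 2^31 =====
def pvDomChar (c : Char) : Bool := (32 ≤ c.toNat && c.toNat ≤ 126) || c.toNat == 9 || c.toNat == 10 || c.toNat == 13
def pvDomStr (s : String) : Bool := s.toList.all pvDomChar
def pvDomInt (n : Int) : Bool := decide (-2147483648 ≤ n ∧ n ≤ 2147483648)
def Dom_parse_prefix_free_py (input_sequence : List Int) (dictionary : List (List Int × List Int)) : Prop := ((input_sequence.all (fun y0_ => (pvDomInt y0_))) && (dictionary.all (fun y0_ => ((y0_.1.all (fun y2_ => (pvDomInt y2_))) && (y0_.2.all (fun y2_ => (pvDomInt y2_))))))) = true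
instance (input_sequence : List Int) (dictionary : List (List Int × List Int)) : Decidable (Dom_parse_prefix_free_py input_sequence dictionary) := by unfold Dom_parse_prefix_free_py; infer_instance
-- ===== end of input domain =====

-- B replaces A's nested re-slicing search (try every window length at each position) by a single
-- incremental pass that grows a buffer and consults a precomputed proper-prefix set (objective: faster one-pass scan).

-- ===== PORT A =====
-- inner while loop of A: grow j until dictionary[input[i:i+j]] hits; returns (final j, extension)
def innerA (input : List Int) (d : PySem.Dict (List Int) (List Int)) (i j : Nat) : Nat × List Int :=
  if _h : i + j ≤ input.length then
    match d.get? (PySem.List.slice input (some (i : Int)) (some ((i : Int) + (j : Int)))) with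
    | some v => (j, v)
    | none => innerA input d i (j + 1)
  else (j, [])
termination_by input.length + 1 - (i + j)
decreasing_by omega

-- the outer loop advances by at least 1 each round (cited by outerA's decreasing_by)
theorem innerA_fst_ge (input : List Int) (d : PySem.Dict (List Int) (List Int)) (i j : Nat) :
    j ≤ (innerA input d i j).1 := by
  fun_induction innerA <;> simp_all <;> omega

-- outer while loop of A, accumulating output_sequence
def outerA (input : List Int) (d : PySem.Dict (List Int) (List Int)) (out : List Int) (i : Nat) : List Int :=
  if _h : i < input.length then
    let r := innerA input d i 1
    outerA input d (out ++ r.2) (i + r.1)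
  else out
termination_by input.length - i
decreasing_by have := innerA_fst_ge input d i 1; omega

def parse_prefix_free_py (input_sequence : List Int) (dictionary : List (List Int × List Int)) : List Int :=
  outerA input_sequence (PySem.Dict.ofList dictionary) [] 0

-- ===== PORT B =====
-- prefixes = {key[:t] for key in dictionary for t in range(1, len(key))}
def prefixSetB (d : PySem.Dict (List Int) (List Int)) : PySem.Set (List Int) :=
  PySem.Set.ofList (d.keys.flatMap (fun key =>
    (PySem.List.pyRange 1 (key.length : Int) 1).map (fun t => PySem.List.slice key (some 0) (some t))))

-- B's single for-loop over input symbols; the 'break' returns the accumulated output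
def loopB (d : PySem.Dict (List Int) (List Int)) (prefixes : PySem.Set (List Int)) :
    List Int → List Int → List Int → List Int
  | out, _, [] => out
  | out, buf, sym :: rest =>
    let buf' := buf ++ [sym]
    match d.get? buf' with
    | some v => loopB d prefixes (out ++ v) [] rest
    | none => if PySem.Set.contains prefixes buf' then loopB d prefixes out buf' rest else out

def parse_prefix_free_py_alt (input_sequence : List Int) (dictionary : List (List Int × List Int)) : List Int :=
  let d := PySem.Dict.ofList dictionary
  loopB d (prefixSetB d) [] [] input_sequence

-- ===== PRECONDITION & SPEC =====
def Spec_parse_prefix_free_py (input_sequence : List Int) (dictionary : List (List Int × List Int)) (out : List Int) : Prop := out = parse_prefix_free_py_alt input_sequence dictionary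
instance (input_sequence : List Int) (dictionary : List (List Int × List Int)) (out : List Int) : Decidable (Spec_parse_prefix_free_py input_sequence dictionary out) := by unfold Spec_parse_prefix_free_py; infer_instance

-- ===== CLAIM (what is proved, stated in full; the proofs are below) =====
def Claim_equal_parse_prefix_free_py : Prop := ∀ (input_sequence : List Int) (dictionary : List (List Int × List Int)), Dom_parse_prefix_free_py input_sequence dictionary → Spec_parse_prefix_free_py input_sequence dictionary (parse_prefix_free_py input_sequence dictionary)

-- ===== LEMMAS AND PROOFS =====

theorem sliceA_eq (input : List Int) (i j : Nat) :
    PySem.List.slice input (some (i : Int)) (some ((i : Int) + (j : Int))) = (input.drop i).take j :=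
  PySem.List.slice_natCast_add input i j

-- membership in B's precomputed prefix set
theorem mem_prefixSetB (d : PySem.Dict (List Int) (List Int)) (buf : List Int) :
    PySem.Set.contains (prefixSetB d) buf = true ↔
      ∃ k ∈ d.keys, ∃ t : Nat, 1 ≤ t ∧ t < k.length ∧ buf = k.take t := by
  unfold prefixSetB
  have hc : ∀ (s : PySem.Set (List Int)), PySem.Set.contains s buf = true ↔ buf ∈ s := by
    intro s; simp [PySem.Set.contains]
  rw [hc, PySem.Set.mem_ofList]
  simp only [List.mem_flatMap, List.mem_map, PySem.List.mem_pyRange_one]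
  constructor
  · rintro ⟨k, hk, t, ⟨ht1, ht2⟩, hs⟩
    refine ⟨k, hk, t.toNat, by omega, by omega, ?_⟩
    rw [PySem.List.slice_zero_start, PySem.List.slice_to k (by omega)] at hs
    exact hs.symm
  · rintro ⟨k, hk, t, ht1, ht2, rfl⟩
    refine ⟨k, hk, (t : Int), ⟨by omega, by omega⟩, ?_⟩
    rw [PySem.List.slice_zero_start, PySem.List.slice_to k (by omega)]
    simp

-- once the buffer is no prefix of any codeword, no longer window can match either
theorem dead_forever (input : List Int) (d : PySem.Dict (List Int) (List Int)) (i j j' : Nat)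
    (h1 : 1 ≤ j) (hj' : j ≤ j') (hle : i + j' ≤ input.length)
    (hnone : d.get? ((input.drop i).take j) = none)
    (hnp : PySem.Set.contains (prefixSetB d) ((input.drop i).take j) = false) :
    d.get? ((input.drop i).take j') = none := by
  rcases eq_or_lt_of_le hj' with rfl | hlt
  · exact hnone
  · cases hq : d.get? ((input.drop i).take j') with
    | none => rfl
    | some v =>
      exfalso
      have hkmem : (input.drop i).take j' ∈ d.keys := by
        by_contra hnk
        rw [(PySem.Dict.get?_eq_none_iff_not_mem_keys d _).2 hnk] at hq
        simp at hq
      have hklen : ((input.drop i).take j').length = j' := by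
        simp [List.length_take, List.length_drop]; omega
      have hbuf : (input.drop i).take j = ((input.drop i).take j').take j := by
        rw [List.take_take]; congr 1; omega
      have : PySem.Set.contains (prefixSetB d) ((input.drop i).take j) = true :=
        (mem_prefixSetB d _).2 ⟨(input.drop i).take j', hkmem, j, h1, by omega, hbuf⟩
      rw [this] at hnp
      exact Bool.noConfusion hnp

-- if no window starting at i of length ≥ j ever matches, innerA runs off the end with empty extension
theorem innerA_none (input : List Int) (d : PySem.Dict (List Int) (List Int)) (i j : Nat)
    (h : ∀ j', j ≤ j' → i + j' ≤ input.length → d.get? ((input.drop i).take j') = none) :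
    input.length < i + (innerA input d i j).1 ∧ (innerA input d i j).2 = [] := by
  suffices H : ∀ (m j : Nat), input.length + 1 - (i + j) ≤ m →
      (∀ j', j ≤ j' → i + j' ≤ input.length → d.get? ((input.drop i).take j') = none) →
      input.length < i + (innerA input d i j).1 ∧ (innerA input d i j).2 = [] from
    H (input.length + 1) j (by omega) h
  intro m
  induction m with
  | zero =>
    intro j hm _
    rw [innerA, dif_neg (by omega)]
    simp; omega
  | succ m ih =>
    intro j hm hall
    by_cases hle : i + j ≤ input.length
    · rw [innerA, dif_pos hle, sliceA_eq, hall j le_rfl hle]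
      exact ih (j + 1) (by omega) (fun j' hj' h2 => hall j' (by omega) h2)
    · rw [innerA, dif_neg hle]
      simp; omega

theorem innerA_snd_of_gt (input : List Int) (d : PySem.Dict (List Int) (List Int)) (i j : Nat)
    (h : input.length < i + (innerA input d i j).1) : (innerA input d i j).2 = [] := by
  fun_induction innerA <;> simp_all <;> omega

-- at the right end of the input both sides finish with the accumulated output
theorem M1end (input : List Int) (d : PySem.Dict (List Int) (List Int)) (i t : Nat) (out : List Int)
    (hn : i + t = input.length) :
    loopB d (prefixSetB d) out ((input.drop i).take t) (input.drop (i + t)) =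
      (if i + (innerA input d i (t + 1)).1 ≤ input.length
       then loopB d (prefixSetB d) (out ++ (innerA input d i (t + 1)).2) [] (input.drop (i + (innerA input d i (t + 1)).1))
       else out) := by
  have hA : innerA input d i (t + 1) = (t + 1, []) := by
    rw [innerA, dif_neg (by omega)]
  have hdrop : input.drop (i + t) = [] := List.drop_eq_nil_of_le (by omega)
  rw [hA, hdrop, if_neg (by omega)]
  rfl

-- inner correspondence: B's scan with buffer input[i:i+t] matches A's inner search from j = t+1
theorem M1 (input : List Int) (d : PySem.Dict (List Int) (List Int)) :
    ∀ (m i t : Nat) (out : List Int), input.length - (i + t) ≤ m → i + t ≤ input.length →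
      loopB d (prefixSetB d) out ((input.drop i).take t) (input.drop (i + t)) =
        (if i + (innerA input d i (t + 1)).1 ≤ input.length
         then loopB d (prefixSetB d) (out ++ (innerA input d i (t + 1)).2) [] (input.drop (i + (innerA input d i (t + 1)).1))
         else out) := by
  intro m
  induction m with
  | zero =>
    intro i t out hm hle
    exact M1end _ _ _ _ _ (by omega)
  | succ m ih =>
    intro i t out hm hle
    by_cases hend : i + t = input.length
    · exact M1end _ _ _ _ _ hend
    · have hlt : i + t < input.length := by omega
      rw [List.drop_eq_getElem_cons hlt]
      simp only [loopB]
      have hbuf : (input.drop i).take t ++ [input[i + t]] = (input.drop i).take (t + 1) := by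
        rw [List.take_add_one]
        congr
        rw [List.getElem?_drop]
        simp [hlt]
      rw [hbuf]
      cases hget : d.get? ((input.drop i).take (t + 1)) with
      | some v =>
        have hA : innerA input d i (t + 1) = (t + 1, v) := by
          rw [innerA, dif_pos (by omega), sliceA_eq, hget]
        have harith : i + t + 1 = i + (t + 1) := by omega
        have hcond : i + (t + 1) ≤ input.length := by omega
        simp [hA, harith, hcond]
      | none =>
        have hstep : innerA input d i (t + 1) = innerA input d i (t + 2) := by
          rw [innerA, dif_pos (by omega), sliceA_eq, hget]
        by_cases hp : PySem.Set.contains (prefixSetB d) ((input.drop i).take (t + 1)) = true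
        · have hm' : input.length - (i + (t + 1)) ≤ m := by omega
          have hle' : i + (t + 1) ≤ input.length := by omega
          have hIH := ih i (t + 1) out hm' hle'
          have harith : i + t + 1 = i + (t + 1) := by omega
          simp only [hp, if_true]
          rw [hstep, harith]
          exact hIH
        · have hp' : PySem.Set.contains (prefixSetB d) ((input.drop i).take (t + 1)) = false := by
            simpa using hp
          simp only [hp', Bool.false_eq_true, if_false]
          obtain ⟨hgt, -⟩ := innerA_none input d i (t + 2)
            (fun j' hj' h2 => dead_forever input d i (t + 1) j' (by omega) (by omega) h2 hget hp')
          rw [hstep, if_neg (by omega)]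

-- outer correspondence
theorem M2 (input : List Int) (d : PySem.Dict (List Int) (List Int)) :
    ∀ (m i : Nat) (out : List Int), input.length - i ≤ m →
      outerA input d out i = loopB d (prefixSetB d) out [] (input.drop i) := by
  intro m
  induction m with
  | zero =>
    intro i out hm
    rw [outerA, dif_neg (by omega), List.drop_eq_nil_of_le (by omega)]
    rfl
  | succ m ih =>
    intro i out hm
    by_cases hlt : i < input.length
    · rw [outerA, dif_pos hlt]
      have hM1 := M1 input d (input.length) i 0 out (by omega) (by omega)
      simp only [List.take_zero, Nat.add_zero] at hM1
      by_cases hin : i + (innerA input d i 1).1 ≤ input.length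
      · rw [hM1, if_pos hin]
        exact ih (i + (innerA input d i 1).1) (out ++ (innerA input d i 1).2)
          (by have := innerA_fst_ge input d i 1; omega)
      · rw [hM1, if_neg hin]
        have hnil := innerA_snd_of_gt input d i 1 (by omega)
        rw [outerA, dif_neg (by omega), hnil, List.append_nil]
    · rw [outerA, dif_neg hlt, List.drop_eq_nil_of_le (by omega)]
      rfl

-- ===== VERDICT (by name: the statement is the Claim_ definition above) =====
theorem parse_prefix_free_py_spec : Claim_equal_parse_prefix_free_py := by
  intro input dict _
  unfold Spec_parse_prefix_free_py parse_prefix_free_py parse_prefix_free_py_alt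
  have := M2 input (PySem.Dict.ofList dict) input.length 0 [] (by omega)
  simpa using this
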